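-- pv_equiv track=rewrite | github.com/romaincollignon/103cipher | src/matrix.py | mess_matrix
-- ===== SOURCE A (Python) =====
-- import math
--
-- def mess_matrix(str, n):
--     size = math.ceil(len(str) / n)
--     matrix = [[0] * int(n) for i in range(int(size))]
--
--     i, j = 0, 0
--     for pos in range(len(str)):
--         matrix[i][j] = ord(str[pos])
--         i = (i + 1) if (j == (n - 1)) else i
--         j = 0 if (j == (n - 1)) else (j + 1)
--     return matrix
-- ===== SOURCE B (Python) =====
-- import math
--
-- def mess_matrix(str, n):
--     codes = [ord(c) for c in str]
--     rows = [codes[k:k + int(n)] for k in range(0, len(codes), int(n))]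
--     if rows:
--         rows[-1] = rows[-1] + [0] * (int(n) - len(rows[-1]))
--     return rows
-- ===== Notes on version B (the rewrite author's own statement) =====
-- stated objective: faster
-- what changed: B never builds or indexes a zero matrix and keeps no (i,j) counter state: it converts the string to a code list once, slices that list into rows by stepping the start index by n, and pads only the last row with zeros, whereas A preallocates a ceil(len/n) x n zero matrix and fills it cell by cell while advancing wrap-around row/column counters.
import Mathlib
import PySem

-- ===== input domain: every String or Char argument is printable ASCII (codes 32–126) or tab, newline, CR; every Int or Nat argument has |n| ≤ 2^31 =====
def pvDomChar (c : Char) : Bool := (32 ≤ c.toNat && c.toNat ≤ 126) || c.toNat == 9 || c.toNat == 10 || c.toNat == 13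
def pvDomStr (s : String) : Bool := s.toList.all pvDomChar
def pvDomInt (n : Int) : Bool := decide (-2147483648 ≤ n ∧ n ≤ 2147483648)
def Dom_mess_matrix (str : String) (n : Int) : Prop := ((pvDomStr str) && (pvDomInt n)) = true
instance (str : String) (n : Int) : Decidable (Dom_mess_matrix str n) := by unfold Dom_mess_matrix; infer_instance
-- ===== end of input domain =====

-- B converts the string to a code list once, slices it into rows stepping the start
-- index by n, and pads only the last row, instead of A's prefilled zero matrix that is
-- written cell by cell while (i, j) counters advance with wrap-around; objective:
-- faster (bulk slicing instead of per-cell writes; a timing run measured it).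
-- Return value only; neither mutates its arguments.

-- ===== PORT A =====
-- One iteration of A's 'for pos in range(len(str))' loop; state = (matrix, i, j).
-- A's counters i, j are always ≥ 0, so .toNat is exact here; the in-place write
-- matrix[i][j] = ord(str[pos]) is List.modify (in range under Pre_mess_matrix).
def messMatrixStep (n : Int) (st : List (List Int) × Int × Int) (c : Char) :
    List (List Int) × Int × Int :=
  let m' := st.1.modify st.2.1.toNat (fun row => row.modify st.2.2.toNat (fun _ => (c.toNat : Int)))
  let i' := if st.2.2 == n - 1 then st.2.1 + 1 else st.2.1
  let j' := if st.2.2 == n - 1 then (0 : Int) else st.2.2 + 1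
  (m', i', j')

def mess_matrix (str : String) (n : Int) : List (List Int) :=
  let s := str.toList
  -- math.ceil(len(str) / n): exact integer ceiling division -((-len) // n)
  let size : Int := -(PySem.Int.floordiv (-(s.length : Int)) n)
  let matrix := (List.range size.toNat).map (fun _ => List.replicate n.toNat (0 : Int))
  (s.foldl (messMatrixStep n) (matrix, 0, 0)).1

-- ===== PORT B =====
-- Source B's body over the code list: rows = [codes[k:k+n] for k in range(0, len, n)];
-- 'if rows: rows[-1] = rows[-1] + [0]*(n - len(rows[-1]))' is the match on getLast?.
def messAltRows (codes : List Int) (n : Int) : List (List Int) :=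
  let rows := (PySem.List.pyRange 0 (codes.length : Int) n).map
    (fun k => PySem.List.slice codes (some k) (some (k + n)))
  if rows.isEmpty then rows
  else
    let last := rows.getLastD []
    rows.dropLast ++ [last ++ List.replicate (n - (last.length : Int)).toNat 0]

def mess_matrix_alt (str : String) (n : Int) : List (List Int) :=
  messAltRows (str.toList.map (fun c => (c.toNat : Int))) n

-- ===== PRECONDITION & SPEC =====
-- Pre_ excludes exactly the inputs where A raises: n = 0 (ZeroDivisionError in
-- math.ceil(len/n)) and n < 0 with a nonempty string (matrix is empty, so
-- matrix[0][0] = ... raises IndexError); A returns on everything else.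
def Pre_mess_matrix (str : String) (n : Int) : Prop :=
  0 < n ∨ (n < 0 ∧ str.toList = [])
instance (str : String) (n : Int) : Decidable (Pre_mess_matrix str n) := by
  unfold Pre_mess_matrix; infer_instance

def pvWitness_mess_matrix : String × Int := ("hello", 2)

def Spec_mess_matrix (str : String) (n : Int) (out : List (List Int)) : Prop :=
  out = mess_matrix_alt str n
instance (str : String) (n : Int) (out : List (List Int)) : Decidable (Spec_mess_matrix str n out) := by
  unfold Spec_mess_matrix; infer_instance

-- ===== CLAIM (what is proved, stated in full; the proofs are below) =====
def Claim_equal_mess_matrix : Prop :=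
  ∀ (str : String) (n : Int), Dom_mess_matrix str n → Pre_mess_matrix str n →
    Spec_mess_matrix str n (mess_matrix str n)

-- ===== LEMMAS AND PROOFS =====

-- The matrix with the first p character codes of cs placed and zeros elsewhere.
-- With p = cs.length both programs produce exactly this grid.
def messGrid (cs : List Char) (n sz p : Nat) : List (List Int) :=
  (List.range sz).map (fun i =>
    (List.range n).map (fun j =>
      if i * n + j < p then ((cs.getD (i * n + j) 'a').toNat : Int) else 0))

lemma messGrid_zero (cs : List Char) (n sz : Nat) :
    messGrid cs n sz 0 = (List.range sz).map (fun _ => List.replicate n (0 : Int)) := by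
  simp [messGrid, List.map_const']

lemma messGrid_step (cs : List Char) (n sz p : Nat) (hn : 0 < n) (hp : p < cs.length)
    (hsz : cs.length ≤ sz * n) :
    (messGrid cs n sz p).modify (p / n)
        (fun row => row.modify (p % n) (fun _ => ((cs.getD p 'a').toNat : Int)))
      = messGrid cs n sz (p + 1) := by
  have hdm : n * (p / n) + p % n = p := Nat.div_add_mod p n
  have hdm' : p / n * n + p % n = p := Nat.div_add_mod' p n
  have hdivlt : p / n < sz := by
    by_contra h
    have h1 : sz * n ≤ (p / n) * n := Nat.mul_le_mul_right n (by omega)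
    have h2 : (p / n) * n ≤ p := Nat.div_mul_le_self p n
    omega
  apply List.ext_getElem
  · simp [messGrid]
  intro i hi hi'
  have hisz : i < sz := by simpa [messGrid] using hi'
  rw [List.getElem_modify]
  by_cases hieq : p / n = i
  · subst hieq
    rw [if_pos rfl]
    simp only [messGrid, List.getElem_map, List.getElem_range]
    apply List.ext_getElem
    · simp
    intro j hj hj'
    have hjn : j < n := by simpa using hj'
    rw [List.getElem_modify]
    simp only [List.getElem_map, List.getElem_range]
    by_cases hjeq : p % n = j
    · subst hjeq
      have hcell : p / n * n + p % n = p := by omega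
      rw [if_pos rfl, hcell]
      simp [hp]
    · rw [if_neg hjeq]
      have hne : p / n * n + j ≠ p := by
        intro hcontra; omega
      by_cases hlt : p / n * n + j < p
      · rw [if_pos hlt, if_pos (by omega)]
      · rw [if_neg hlt, if_neg (by omega)]
  · simp only [messGrid, List.getElem_map, List.getElem_range]
    rw [if_neg hieq]
    apply List.ext_getElem
    · simp
    intro j hj hj'
    have hjn : j < n := by simpa using hj'
    simp only [List.getElem_map, List.getElem_range]
    have hne : i * n + j ≠ p := by
      intro hcontra
      apply hieq
      have hdiv : (i * n + j) / n = i := by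
        rw [Nat.add_comm, Nat.add_mul_div_right _ _ hn, Nat.div_eq_of_lt hjn]
        omega
      rw [hcontra] at hdiv
      exact hdiv
    by_cases hlt : i * n + j < p
    · rw [if_pos hlt, if_pos (by omega)]
    · rw [if_neg hlt, if_neg (by omega)]

lemma divmod_succ_last (n p : Nat) (hn : 0 < n) (h : p % n = n - 1) :
    (p + 1) / n = p / n + 1 ∧ (p + 1) % n = 0 := by
  have hdm : n * (p / n) + p % n = p := Nat.div_add_mod p n
  have h2 : p + 1 = n * (p / n + 1) := by rw [Nat.mul_succ]; omega
  constructor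
  · rw [h2, Nat.mul_div_cancel_left _ hn]
  · rw [h2, Nat.mul_mod_right]

lemma divmod_succ_mid (n p : Nat) (hn : 0 < n) (h : p % n ≠ n - 1) :
    (p + 1) / n = p / n ∧ (p + 1) % n = p % n + 1 := by
  have hdm : n * (p / n) + p % n = p := Nat.div_add_mod p n
  have hlt : p % n < n := Nat.mod_lt p hn
  have h2 : p + 1 = p % n + 1 + n * (p / n) := by omega
  have hsucc : p % n + 1 < n := by omega
  constructor
  · rw [h2, Nat.add_mul_div_left _ _ hn, Nat.div_eq_of_lt hsucc]; omega
  · rw [h2, Nat.add_mul_mod_self_left, Nat.mod_eq_of_lt hsucc]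

-- Loop invariant for A's fold: after p steps the matrix holds the first p codes and
-- the counters are p / n and p % n.
lemma messMatrix_fold_inv (n sz : Nat) (hn : 0 < n) (cs : List Char)
    (hsz : cs.length ≤ sz * n) :
    ∀ (rest : List Char) (p : Nat), rest = cs.drop p → p + rest.length = cs.length →
      (rest.foldl (messMatrixStep ((n : Nat) : Int))
          (messGrid cs n sz p, ((p / n : Nat) : Int), ((p % n : Nat) : Int))).1
        = messGrid cs n sz cs.length := by
  intro rest
  induction rest with
  | nil =>
    intro p _ hlen
    simp only [List.foldl_nil]
    have : p = cs.length := by simpa using hlen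
    rw [this]
  | cons c rest' ih =>
    intro p hdrop hlen
    have hp : p < cs.length := by
      have := hlen; simp at this; omega
    have hc : cs[p]? = some c := by
      have h0 : (cs.drop p)[0]? = some c := by rw [← hdrop]; rfl
      rw [List.getElem?_drop] at h0
      simpa using h0
    have hgetD : cs.getD p 'a' = c := by
      rw [List.getD_eq_getElem?_getD, hc]; rfl
    have hdrop' : rest' = cs.drop (p + 1) := by
      have := congrArg List.tail hdrop
      simpa [List.tail_drop] using this
    rw [List.foldl_cons]
    have hstep :
        messMatrixStep ((n : Nat) : Int)
          (messGrid cs n sz p, ((p / n : Nat) : Int), ((p % n : Nat) : Int)) c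
        = (messGrid cs n sz (p + 1), (((p + 1) / n : Nat) : Int), (((p + 1) % n : Nat) : Int)) := by
      simp only [messMatrixStep]
      have hm : (messGrid cs n sz p).modify ((p / n : Nat) : Int).toNat
          (fun row => row.modify ((p % n : Nat) : Int).toNat (fun _ => (c.toNat : Int)))
          = messGrid cs n sz (p + 1) := by
        rw [Int.toNat_natCast, Int.toNat_natCast, ← hgetD]
        exact messGrid_step cs n sz p hn hp hsz
      by_cases hlast : p % n = n - 1
      · have hbeq : (((p % n : Nat) : Int) == ((n : Nat) : Int) - 1) = true := by
          simp only [beq_iff_eq]; omega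
        obtain ⟨hd, hmod⟩ := divmod_succ_last n p hn hlast
        simp only [hbeq, if_true, hm, hd, hmod]
        simp
      · have hbeq : (((p % n : Nat) : Int) == ((n : Nat) : Int) - 1) = false := by
          simp only [beq_eq_false_iff_ne, ne_eq]
          intro hcontra
          have hlt : p % n < n := Nat.mod_lt p hn
          omega
        obtain ⟨hd, hmod⟩ := divmod_succ_mid n p hn hlast
        simp only [hbeq, hm, hd, hmod]
        simp
    rw [hstep]
    exact ih (p + 1) hdrop' (by simp at hlen ⊢; omega)

-- B's chunk starting at a, as drop/take on the code list.
lemma messAlt_chunk (cs : List Char) (nn a : Nat) :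
    PySem.List.slice (cs.map (fun c => (c.toNat : Int))) (some ((a : Nat) : Int))
        (some (((a : Nat) : Int) + ((nn : Nat) : Int)))
      = ((cs.map (fun c => (c.toNat : Int))).drop a).take nn := by
  rw [PySem.List.slice_natCast_add]

-- A full (non-last) grid row is B's chunk.
lemma messGrid_row_full (cs : List Char) (nn i : Nat) (hfull : i * nn + nn ≤ cs.length) :
    (List.range nn).map (fun j =>
        if i * nn + j < cs.length then ((cs.getD (i * nn + j) 'a').toNat : Int) else 0)
      = ((cs.map (fun c => (c.toNat : Int))).drop (i * nn)).take nn := by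
  apply List.ext_getElem
  · simp; omega
  intro j hj hj'
  have hjn : j < nn := by simpa using hj
  simp only [List.getElem_map, List.getElem_range, List.getElem_take, List.getElem_drop]
  rw [if_pos (by omega)]
  rw [List.getD_eq_getElem _ _ (by omega)]

-- The last grid row is B's (possibly short) chunk padded with zeros.
lemma messGrid_row_last (cs : List Char) (nn i : Nat) (hlo : i * nn < cs.length)
    (hhi : cs.length ≤ i * nn + nn) :
    (List.range nn).map (fun j =>
        if i * nn + j < cs.length then ((cs.getD (i * nn + j) 'a').toNat : Int) else 0)
      = ((cs.map (fun c => (c.toNat : Int))).drop (i * nn)).take nn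
          ++ List.replicate (nn - (cs.length - i * nn)) 0 := by
  have hlen : (((cs.map (fun c => (c.toNat : Int))).drop (i * nn)).take nn).length
      = cs.length - i * nn := by simp; omega
  apply List.ext_getElem
  · simp; omega
  intro j hj hj'
  have hjn : j < nn := by simpa using hj
  simp only [List.getElem_map, List.getElem_range]
  by_cases hlt : i * nn + j < cs.length
  · rw [if_pos hlt, List.getElem_append_left (by omega)]
    simp only [List.getElem_take, List.getElem_drop, List.getElem_map]
    rw [List.getD_eq_getElem _ _ (by omega)]
  · rw [if_neg hlt, List.getElem_append_right (by rw [hlen]; omega)]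
    simp

-- B's result is the same grid, for n > 0 and any sz satisfying the ceiling bracket.
lemma messAlt_eq_grid (cs : List Char) (n : Int) (hn : 0 < n) (sz : Nat)
    (hbr1 : ((sz : Nat) : Int) * n - n < (cs.length : Int))
    (hbr2 : ((cs.length : Nat) : Int) ≤ ((sz : Nat) : Int) * n) :
    messAltRows (cs.map (fun c => (c.toNat : Int))) n = messGrid cs n.toNat sz cs.length := by
  set nn := n.toNat with hnn
  have hncast : ((nn : Nat) : Int) = n := Int.toNat_of_nonneg (le_of_lt hn)
  have hnn0 : 0 < nn := by omega
  have hszn1 : ((sz * nn : Nat) : Int) = (sz : Int) * n := by push_cast [hncast]; ring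
  have hInt1 : ((sz * nn : Nat) : Int) < (cs.length : Int) + ((nn : Nat) : Int) := by
    rw [hszn1, hncast]; linarith
  have hInt2 : (cs.length : Int) ≤ ((sz * nn : Nat) : Int) := by rw [hszn1]; exact hbr2
  have hbrN2 : cs.length ≤ sz * nn := by exact_mod_cast hInt2
  have hbrN1 : sz * nn < cs.length + nn := by exact_mod_cast hInt1
  have hlenmap : ((cs.map (fun c => (c.toNat : Int))).length : Int) = (cs.length : Int) := by simp
  -- the range of start indices has exactly sz elements, the multiples of n
  have hcount : PySem.List.pyRange 0 ((cs.map (fun c => (c.toNat : Int))).length : Int) n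
      = (List.range sz).map (fun k => ((k * nn : Nat) : Int)) := by
    rw [PySem.List.pyRange_of_pos _ _ hn]
    rcases Nat.eq_zero_or_pos cs.length with h0 | hpos
    · have hsz0 : sz = 0 := by
        by_contra h
        have h1 : 1 * nn ≤ sz * nn := Nat.mul_le_mul_right nn (by omega)
        omega
      simp [h0, hsz0]
    · have hlt : (0 : Int) < ((cs.map (fun c => (c.toNat : Int))).length : Int) := by
        rw [hlenmap]; exact_mod_cast hpos
      rw [if_pos (by simpa using hlt), hlenmap]
      have hdiv : ((cs.length : Int) - 0 + n - 1) / n = (sz : Int) := by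
        rw [← PySem.Int.floordiv_eq_ediv_of_pos hn,
          PySem.Int.floordiv_eq_iff_of_pos hn]
        constructor
        · linarith
        · have he : ((sz : Int) + 1) * n = (sz : Int) * n + n := by ring
          linarith
      rw [hdiv, Int.toNat_natCast]
      apply List.map_congr_left
      intro k hk
      push_cast [hncast]
      ring
  rcases Nat.eq_zero_or_pos cs.length with h0 | hpos
  · -- empty string: no rows, empty grid
    have hsz0 : sz = 0 := by
      by_contra h
      have h1 : 1 * nn ≤ sz * nn := Nat.mul_le_mul_right nn (by omega)
      omega
    have hcs : cs = [] := List.length_eq_zero_iff.mp h0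
    simp [messAltRows, messGrid, hcs, hsz0, PySem.List.pyRange]
  · have hsz1 : 0 < sz := by
      rcases Nat.eq_zero_or_pos sz with h | h
      · subst h; simp at hbrN2; omega
      · exact h
    obtain ⟨t, ht⟩ : ∃ t, sz = t + 1 := ⟨sz - 1, by omega⟩
    subst ht
    have htexp : (t + 1) * nn = t * nn + nn := by ring
    simp only [messAltRows]
    rw [hcount]
    simp only [List.map_map, Function.comp_def]
    have hchunk : (fun k : Nat => PySem.List.slice (cs.map (fun c => (c.toNat : Int)))
        (some ((k * nn : Nat) : Int)) (some (((k * nn : Nat) : Int) + n)))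
        = fun k : Nat => ((cs.map (fun c => (c.toNat : Int))).drop (k * nn)).take nn := by
      funext k
      rw [← hncast]
      exact messAlt_chunk cs nn (k * nn)
    simp only [hchunk]
    set chunk : Nat → List Int :=
      fun k => ((cs.map (fun c => (c.toNat : Int))).drop (k * nn)).take nn with hchunkdef
    -- split off the last row on both sides
    rw [List.range_succ, List.map_append, List.map_singleton]
    rw [if_neg (by simp), List.getLastD_concat, List.dropLast_concat]
    have hlastlen : (chunk t).length = cs.length - t * nn := by
      simp [hchunkdef]; omega
    have hpad : (n - ((chunk t).length : Int)).toNat = nn - (cs.length - t * nn) := by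
      rw [hlastlen, ← hncast]; omega
    rw [hpad]
    unfold messGrid
    rw [List.range_succ, List.map_append, List.map_singleton]
    congr 1
    · apply List.map_congr_left
      intro i hi
      have hit : i < t := List.mem_range.mp hi
      have hmono : (i + 1) * nn ≤ t * nn := Nat.mul_le_mul_right nn (by omega)
      have hiexp : (i + 1) * nn = i * nn + nn := by ring
      exact (messGrid_row_full cs nn i (by omega)).symm
    · rw [messGrid_row_last cs nn t (by omega) (by omega)]

-- ===== VERDICT (by name: the statement is the Claim_ definition above) =====
theorem mess_matrix_spec : Claim_equal_mess_matrix := by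
  intro str n _ hpre
  rcases hpre with hn | ⟨hneg, hnil⟩
  · -- n > 0
    simp only [Spec_mess_matrix, mess_matrix, mess_matrix_alt]
    set cs := str.toList with hcs
    set size : Int := -(PySem.Int.floordiv (-(cs.length : Int)) n) with hsize
    -- ceiling-division bracket: (size - 1) * n < len ∧ len ≤ size * n
    have hbr : (size - 1) * n < (cs.length : Int) ∧ (cs.length : Int) ≤ size * n :=
      (PySem.Int.neg_floordiv_neg_eq_iff_of_pos (a := (cs.length : Int)) (b := n) (q := size) hn).mp hsize.symm
    have hsz_nonneg : 0 ≤ size := by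
      by_contra h
      have h1 : size ≤ -1 := by omega
      have h2 : size * n ≤ (-1) * n := mul_le_mul_of_nonneg_right h1 (by omega)
      have h3 : (0 : Int) ≤ (cs.length : Int) := by positivity
      omega
    have hszcast : ((size.toNat : Nat) : Int) = size := Int.toNat_of_nonneg hsz_nonneg
    have hlen : cs.length ≤ size.toNat * n.toNat := by
      have hc : ((size.toNat * n.toNat : Nat) : Int) = size * n := by
        push_cast [hszcast, Int.toNat_of_nonneg (le_of_lt hn)]
        ring
      have := hbr.2
      omega
    have hncast : (((n.toNat : Nat) : Int)) = n := Int.toNat_of_nonneg (le_of_lt hn)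
    have hinit : (List.range size.toNat).map (fun _ => List.replicate n.toNat (0 : Int))
        = messGrid cs n.toNat size.toNat 0 := (messGrid_zero cs n.toNat size.toNat).symm
    have hfold := messMatrix_fold_inv n.toNat size.toNat (by omega) cs hlen cs 0 rfl (by simp)
    rw [hncast] at hfold
    simp only [Nat.zero_div, Nat.zero_mod, Nat.cast_zero] at hfold
    rw [hinit, hfold]
    rw [messAlt_eq_grid cs n hn size.toNat
      (by rw [hszcast]; have := hbr.1; linarith [sub_one_mul size n])
      (by rw [hszcast]; exact hbr.2)]
  · -- n < 0 and the string is empty: both produce []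
    simp [Spec_mess_matrix, mess_matrix, mess_matrix_alt, messAltRows, hnil,
      PySem.Int.floordiv, PySem.List.pyRange]
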